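-- pv_equiv track=rewrite | github.com/satyajeetramnit/Switch | D.E. Shaw & Co/DEShaw.py | getMaxDiscount
-- ===== SOURCE A (Python) =====
-- def getOR(arr):
--     valueOR = 0
--     for i in arr:
--         valueOR |= i
--     return valueOR
--
-- def getMaxDiscount(discounts, k):
--     n = len(discounts)
--     maxDiscount = getOR(discounts)
--     copyDiscounts = discounts.copy()
--
--     for i in range(1, k+1):
--         multiplier = 2 ** i
--         for j in range(n):
--             original_value = copyDiscounts[j]
--             copyDiscounts[j] = discounts[j] * multiplier
--             tempMaxDiscount = getOR(copyDiscounts)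
--
--             if tempMaxDiscount > maxDiscount:
--                 maxDiscount = tempMaxDiscount
--
--             copyDiscounts[j] = original_value
--
--     return maxDiscount
-- ===== SOURCE B (Python) =====
-- def _scan_or(start, xs):
--     out = [start]
--     for x in xs:
--         start |= x
--         out.append(start)
--     return out
--
-- def getMaxDiscount(discounts, k):
--     n = len(discounts)
--     pre = _scan_or(0, discounts)                 # pre[j]  = OR of discounts[:j]
--     suf = _scan_or(0, discounts[::-1])[::-1]     # suf[j]  = OR of discounts[j:]
--     best = pre[n]
--     for i in range(1, k + 1):
--         m = 2 ** i
--         for j in range(n):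
--             cand = pre[j] | (discounts[j] * m) | suf[j + 1]
--             if cand > best:
--                 best = cand
--     return best
-- ===== Notes on version B (the rewrite author's own statement) =====
-- stated objective: faster
-- what changed: Instead of re-ORing the whole modified list for every (i, j) trial, B precomputes prefix and suffix running-OR tables once and evaluates each trial as pre[j] | discounts[j]*2^i | suf[j+1] in O(1).
import Mathlib
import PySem

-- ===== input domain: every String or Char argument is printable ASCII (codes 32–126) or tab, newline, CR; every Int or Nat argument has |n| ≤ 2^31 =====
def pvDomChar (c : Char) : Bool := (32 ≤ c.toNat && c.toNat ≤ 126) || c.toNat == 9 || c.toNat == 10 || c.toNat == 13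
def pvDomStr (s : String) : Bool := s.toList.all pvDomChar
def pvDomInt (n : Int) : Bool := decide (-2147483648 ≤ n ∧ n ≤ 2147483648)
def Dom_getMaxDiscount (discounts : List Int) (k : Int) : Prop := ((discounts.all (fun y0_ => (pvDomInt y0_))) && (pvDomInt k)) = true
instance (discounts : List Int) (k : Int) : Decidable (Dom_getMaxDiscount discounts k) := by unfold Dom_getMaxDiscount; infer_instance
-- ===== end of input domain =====

-- B replaces A's per-trial O(n) re-OR of the whole modified list by prefix/suffix
-- running-OR tables computed once, making each (i, j) trial O(1)  (objective: faster).


-- ===== PORT A =====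
def getOR (arr : List Int) : Int :=
  arr.foldl (fun valueOR i => PySem.Int.bor valueOR i) 0

def getMaxDiscount (discounts : List Int) (k : Int) : Int :=
  let n := discounts.length
  let maxDiscount := getOR discounts
  let copyDiscounts := discounts
  let st :=
    (PySem.List.pyRange 1 (k+1) 1).foldl (fun st i =>
      let multiplier : Int := 2 ^ i.toNat
      (List.range n).foldl (fun st j =>
        let original_value := st.1.getD j 0
        let copy := st.1.set j ((discounts.getD j 0) * multiplier)
        let tempMaxDiscount := getOR copy
        let maxD := if tempMaxDiscount > st.2 then tempMaxDiscount else st.2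
        (copy.set j original_value, maxD)) st) (copyDiscounts, maxDiscount)
  st.2

-- ===== PORT B =====
-- running OR: scanOr s xs = [s, s|x0, s|x0|x1, …]  (Source B's _scan_or)
def scanOr (start : Int) : List Int → List Int
  | [] => [start]
  | x :: xs => start :: scanOr (PySem.Int.bor start x) xs

def getMaxDiscount_alt (discounts : List Int) (k : Int) : Int :=
  let n := discounts.length
  let pre := scanOr 0 discounts
  let suf := (scanOr 0 discounts.reverse).reverse
  let best := pre.getD n 0
  (PySem.List.pyRange 1 (k+1) 1).foldl (fun best i =>
    let m : Int := 2 ^ i.toNat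
    (List.range n).foldl (fun best j =>
      let cand := PySem.Int.bor (PySem.Int.bor (pre.getD j 0) ((discounts.getD j 0) * m)) (suf.getD (j+1) 0)
      if cand > best then cand else best) best) best

-- ===== PRECONDITION & SPEC =====
def Spec_getMaxDiscount (discounts : List Int) (k : Int) (out : Int) : Prop := out = getMaxDiscount_alt discounts k
instance (discounts : List Int) (k : Int) (out : Int) : Decidable (Spec_getMaxDiscount discounts k out) := by unfold Spec_getMaxDiscount; infer_instance

-- ===== CLAIM (what is proved, stated in full; the proofs are below) =====
def Claim_equal_getMaxDiscount : Prop := ∀ (discounts : List Int) (k : Int), Dom_getMaxDiscount discounts k → Spec_getMaxDiscount discounts k (getMaxDiscount discounts k)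

-- ===== LEMMAS AND PROOFS =====

-- bits of x not in y, via truncated subtraction (used by PySem.Int.bor's negative branches)
theorem ldiff_add_and (x y : Nat) : Nat.ldiff x y + (x &&& y) = x := by
  induction x using Nat.binaryRec generalizing y with
  | zero => simp [Nat.ldiff, Nat.bitwise_zero_left]
  | bit b n ih =>
    induction y using Nat.binaryRec with
    | zero => simp [Nat.ldiff, Nat.bitwise_zero_right]
    | bit c m _ =>
      have h := ih m
      rw [Nat.ldiff_bit, Nat.land_bit, Nat.bit_val, Nat.bit_val, Nat.bit_val]
      cases b <;> cases c <;> simp <;> omega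

theorem sub_and_eq_ldiff (x y : Nat) : x - (x &&& y) = Nat.ldiff x y := by
  have h := ldiff_add_and x y; omega

-- two's-complement bit readout of an Int
def btest (a : Int) (i : Nat) : Bool :=
  if 0 ≤ a then a.toNat.testBit i else !((-a - 1).toNat.testBit i)

theorem btest_bor (a b : Int) (i : Nat) : btest (PySem.Int.bor a b) i = (btest a i || btest b i) := by
  unfold PySem.Int.bor btest
  by_cases ha : 0 ≤ a <;> by_cases hb : 0 ≤ b <;>
    simp only [ha, hb, if_true, if_false]
  · rw [if_pos (by positivity)]
    simp [Nat.testBit_or]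
  · rw [if_neg (by omega), show -(-((((-b - 1).toNat - ((-b - 1).toNat &&& a.toNat) : Nat) : Int)) - 1) - 1
        = (((-b - 1).toNat - ((-b - 1).toNat &&& a.toNat) : Nat) : Int) by ring]
    rw [Int.toNat_natCast, sub_and_eq_ldiff, Nat.testBit_ldiff]
    cases hx : Nat.testBit (-b - 1).toNat i <;> cases hy : Nat.testBit a.toNat i <;> simp_all
  · rw [if_neg (by omega), show -(-((((-a - 1).toNat - ((-a - 1).toNat &&& b.toNat) : Nat) : Int)) - 1) - 1
        = (((-a - 1).toNat - ((-a - 1).toNat &&& b.toNat) : Nat) : Int) by ring]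
    rw [Int.toNat_natCast, sub_and_eq_ldiff, Nat.testBit_ldiff]
    cases hx : Nat.testBit (-a - 1).toNat i <;> cases hy : Nat.testBit b.toNat i <;> simp_all
  · rw [if_neg (by omega), show -(-((((-a - 1).toNat &&& (-b - 1).toNat : Nat) : Int)) - 1) - 1
        = (((-a - 1).toNat &&& (-b - 1).toNat : Nat) : Int) by ring]
    rw [Int.toNat_natCast, Nat.testBit_and]
    cases hx : Nat.testBit (-a - 1).toNat i <;> cases hy : Nat.testBit (-b - 1).toNat i <;> simp_all

theorem btest_inj (a b : Int) (h : ∀ i, btest a i = btest b i) : a = b := by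
  by_cases ha : 0 ≤ a <;> by_cases hb : 0 ≤ b
  · have : a.toNat = b.toNat := by
      apply Nat.eq_of_testBit_eq
      intro i; have := h i; simpa [btest, ha, hb] using this
    omega
  · exfalso
    have hi := h (a.toNat + (-b - 1).toNat)
    have h1 : Nat.testBit a.toNat (a.toNat + (-b - 1).toNat) = false := by
      apply Nat.testBit_lt_two_pow
      calc a.toNat < 2 ^ a.toNat := Nat.lt_two_pow_self
        _ ≤ 2 ^ (a.toNat + (-b - 1).toNat) := Nat.pow_le_pow_right (by norm_num) (by omega)
    have h2 : Nat.testBit (-b - 1).toNat (a.toNat + (-b - 1).toNat) = false := by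
      apply Nat.testBit_lt_two_pow
      calc (-b - 1).toNat < 2 ^ (-b - 1).toNat := Nat.lt_two_pow_self
        _ ≤ 2 ^ (a.toNat + (-b - 1).toNat) := Nat.pow_le_pow_right (by norm_num) (by omega)
    unfold btest at hi
    rw [if_pos ha, if_neg hb, h1, h2] at hi
    simp at hi
  · exfalso
    have hi := h (b.toNat + (-a - 1).toNat)
    have h1 : Nat.testBit b.toNat (b.toNat + (-a - 1).toNat) = false := by
      apply Nat.testBit_lt_two_pow
      calc b.toNat < 2 ^ b.toNat := Nat.lt_two_pow_self
        _ ≤ 2 ^ (b.toNat + (-a - 1).toNat) := Nat.pow_le_pow_right (by norm_num) (by omega)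
    have h2 : Nat.testBit (-a - 1).toNat (b.toNat + (-a - 1).toNat) = false := by
      apply Nat.testBit_lt_two_pow
      calc (-a - 1).toNat < 2 ^ (-a - 1).toNat := Nat.lt_two_pow_self
        _ ≤ 2 ^ (b.toNat + (-a - 1).toNat) := Nat.pow_le_pow_right (by norm_num) (by omega)
    unfold btest at hi
    rw [if_neg ha, if_pos hb, h1, h2] at hi
    simp at hi
  · have : (-a - 1).toNat = (-b - 1).toNat := by
      apply Nat.eq_of_testBit_eq
      intro i; have := h i
      simp only [btest, ha, hb, if_false, Bool.not_inj_iff] at this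
      exact this
    omega

theorem bor_assoc (a b c : Int) :
    PySem.Int.bor (PySem.Int.bor a b) c = PySem.Int.bor a (PySem.Int.bor b c) := by
  apply btest_inj; intro i; simp [btest_bor, Bool.or_assoc]

theorem zero_bor (a : Int) : PySem.Int.bor 0 a = a := by
  rw [PySem.Int.bor_comm]; exact PySem.Int.bor_zero a

theorem foldl_bor_shift (l : List Int) (c : Int) :
    l.foldl (fun v i => PySem.Int.bor v i) c = PySem.Int.bor c (getOR l) := by
  induction l generalizing c with
  | nil => simp [getOR, PySem.Int.bor_zero]
  | cons x xs ih =>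
    simp only [getOR, List.foldl_cons] at *
    rw [ih (PySem.Int.bor c x), ih (PySem.Int.bor 0 x), zero_bor, bor_assoc]

theorem getOR_cons (x : Int) (xs : List Int) : getOR (x :: xs) = PySem.Int.bor x (getOR xs) := by
  simp only [getOR, List.foldl_cons, zero_bor]
  exact foldl_bor_shift xs x

theorem getOR_append (a b : List Int) : getOR (a ++ b) = PySem.Int.bor (getOR a) (getOR b) := by
  simp only [getOR, List.foldl_append]
  exact foldl_bor_shift b (getOR a)

theorem getOR_reverse (l : List Int) : getOR l.reverse = getOR l := by
  induction l with
  | nil => rfl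
  | cons x xs ih =>
    rw [List.reverse_cons, getOR_append, ih, getOR_cons, PySem.Int.bor_comm]
    simpa [getOR, zero_bor] using (foldl_bor_shift xs x).symm

theorem scanOr_length (s : Int) (l : List Int) : (scanOr s l).length = l.length + 1 := by
  induction l generalizing s with
  | nil => rfl
  | cons x xs ih => simp [scanOr, ih]

theorem scanOr_getD (l : List Int) (s : Int) (j : Nat) (hj : j ≤ l.length) :
    (scanOr s l).getD j 0 = PySem.Int.bor s (getOR (l.take j)) := by
  induction l generalizing s j with
  | nil =>
    obtain rfl : j = 0 := Nat.le_zero.mp hj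
    simp [scanOr, getOR, PySem.Int.bor_zero]
  | cons x xs ih =>
    cases j with
    | zero => simp [scanOr, getOR, PySem.Int.bor_zero]
    | succ j =>
      rw [scanOr, List.getD_cons_succ, ih (PySem.Int.bor s x) j (by simpa using hj),
        List.take_succ_cons, getOR_cons, bor_assoc]

theorem pre_getD (l : List Int) (j : Nat) (hj : j ≤ l.length) :
    (scanOr 0 l).getD j 0 = getOR (l.take j) := by
  rw [scanOr_getD l 0 j hj, zero_bor]

theorem suf_getD (l : List Int) (j : Nat) (hj : j ≤ l.length) :
    ((scanOr 0 l.reverse).reverse).getD j 0 = getOR (l.drop j) := by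
  have hlen : (scanOr 0 l.reverse).length = l.length + 1 := by
    rw [scanOr_length, List.length_reverse]
  have hj1 : j < ((scanOr 0 l.reverse).reverse).length := by
    rw [List.length_reverse, hlen]; omega
  rw [List.getD_eq_getElem _ 0 hj1, List.getElem_reverse]
  have hidx : (scanOr 0 l.reverse).length - 1 - j = l.length - j := by omega
  rw [← List.getD_eq_getElem _ 0, hidx, scanOr_getD l.reverse 0 (l.length - j)
        (by rw [List.length_reverse]; omega), zero_bor]
  rw [List.take_reverse, getOR_reverse, show l.length - (l.length - j) = j from by omega]

theorem getOR_set (l : List Int) (j : Nat) (v : Int) (hj : j < l.length) :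
    getOR (l.set j v) =
      PySem.Int.bor (PySem.Int.bor (getOR (l.take j)) v) (getOR (l.drop (j+1))) := by
  rw [List.set_eq_take_append_cons_drop, if_pos hj, getOR_append, getOR_cons, ← bor_assoc,
    PySem.Int.bor_comm (getOR (l.take j)) v, bor_assoc, PySem.Int.bor_comm v]

theorem restore_set (l : List Int) (j : Nat) (v : Int) (hj : j < l.length) :
    (l.set j v).set j (l.getD j 0) = l := by
  rw [List.set_set, List.getD_eq_getElem l 0 hj, List.set_getElem_self]

-- the inner loop of A keeps the list component equal to `discounts` and drives
-- the same maximum as the inner loop of B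
theorem inner_loop (d : List Int) (m b : Int) (J : List Nat) (hJ : ∀ j ∈ J, j < d.length) :
    J.foldl (fun st j =>
        let original_value := st.1.getD j 0
        let copy := st.1.set j ((d.getD j 0) * m)
        let tempMaxDiscount := getOR copy
        let maxD := if tempMaxDiscount > st.2 then tempMaxDiscount else st.2
        ((copy.set j original_value : List Int), maxD)) (d, b)
      = (d, J.foldl (fun best j =>
          let cand := PySem.Int.bor (PySem.Int.bor ((scanOr 0 d).getD j 0) ((d.getD j 0) * m))
            (((scanOr 0 d.reverse).reverse).getD (j+1) 0)
          if cand > best then cand else best) b) := by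
  induction J generalizing b with
  | nil => rfl
  | cons j J ih =>
    have hjd : j < d.length := hJ j (List.mem_cons_self ..)
    simp only [List.foldl_cons]
    rw [show ((d.set j ((d.getD j 0) * m)).set j (d.getD j 0) : List Int) = d from
      restore_set d j _ hjd]
    rw [show getOR (d.set j ((d.getD j 0) * m))
        = PySem.Int.bor (PySem.Int.bor ((scanOr 0 d).getD j 0) ((d.getD j 0) * m))
            (((scanOr 0 d.reverse).reverse).getD (j+1) 0) from by
      rw [getOR_set d j _ hjd, pre_getD d j (Nat.le_of_lt hjd), suf_getD d (j+1) hjd]]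
    exact ih _ (fun x hx => hJ x (List.mem_cons_of_mem _ hx))

theorem outer_loop (d : List Int) (b : Int) (I : List Int) :
    I.foldl (fun st i =>
        let multiplier : Int := 2 ^ i.toNat
        (List.range d.length).foldl (fun st j =>
          let original_value := st.1.getD j 0
          let copy := st.1.set j ((d.getD j 0) * multiplier)
          let tempMaxDiscount := getOR copy
          let maxD := if tempMaxDiscount > st.2 then tempMaxDiscount else st.2
          ((copy.set j original_value : List Int), maxD)) st) (d, b)
      = (d, I.foldl (fun best i =>
          let m : Int := 2 ^ i.toNat
          (List.range d.length).foldl (fun best j =>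
            let cand := PySem.Int.bor (PySem.Int.bor ((scanOr 0 d).getD j 0) ((d.getD j 0) * m))
              (((scanOr 0 d.reverse).reverse).getD (j+1) 0)
            if cand > best then cand else best) best) b) := by
  induction I generalizing b with
  | nil => rfl
  | cons i I ih =>
    simp only [List.foldl_cons]
    rw [inner_loop d (2 ^ i.toNat) b (List.range d.length) (fun j hj => List.mem_range.mp hj)]
    exact ih _

-- ===== VERDICT (by name: the statement is the Claim_ definition above) =====
theorem getMaxDiscount_spec : Claim_equal_getMaxDiscount := by
  intro discounts k _
  show getMaxDiscount discounts k = getMaxDiscount_alt discounts k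
  unfold getMaxDiscount getMaxDiscount_alt
  simp only []
  rw [outer_loop]
  rw [pre_getD discounts discounts.length le_rfl, List.take_length]
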